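-- pv_equiv track=rewrite | github.com/jhogstrom/adventofcode | 2022/dec19.py | best_result
-- ===== SOURCE A (Python) =====
-- from typing import List
--
-- material = {
--     "geode": 0,
--     "obsidian": 1,
--     "clay": 2,
--     "ore": 3
-- }
--
-- def best_result(result: List):
--     best = None
--     highest = 0
--     for m in material:
--         if best:
--             return best
--         for i, r in enumerate(result):
--             if r is None:
--                 continue
--             if r.get(m, 0) > highest:
--                 highest = r[m]
--                 best = r
--     # if best:
--     return best
-- ===== SOURCE B (Python) =====
-- MATERIALS = ["geode", "obsidian", "clay", "ore"]
--
-- def best_result(result):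
--     best = {m: None for m in MATERIALS}
--     top = {m: 0 for m in MATERIALS}
--     for r in result:
--         if r is None:
--             continue
--         for m in MATERIALS:
--             v = r.get(m, 0)
--             if v > top[m]:
--                 top[m] = v
--                 best[m] = r
--     for m in MATERIALS:
--         if best[m] is not None:
--             return best[m]
--     return None
-- ===== Notes on version B (the rewrite author's own statement) =====
-- stated objective: alternative
-- what changed: A rescans the whole list once per material with an early return and shared (best, highest) state; B makes a single pass over result maintaining per-material (best, top) slots and then picks the first non-None slot in priority order.
import Mathlib
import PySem

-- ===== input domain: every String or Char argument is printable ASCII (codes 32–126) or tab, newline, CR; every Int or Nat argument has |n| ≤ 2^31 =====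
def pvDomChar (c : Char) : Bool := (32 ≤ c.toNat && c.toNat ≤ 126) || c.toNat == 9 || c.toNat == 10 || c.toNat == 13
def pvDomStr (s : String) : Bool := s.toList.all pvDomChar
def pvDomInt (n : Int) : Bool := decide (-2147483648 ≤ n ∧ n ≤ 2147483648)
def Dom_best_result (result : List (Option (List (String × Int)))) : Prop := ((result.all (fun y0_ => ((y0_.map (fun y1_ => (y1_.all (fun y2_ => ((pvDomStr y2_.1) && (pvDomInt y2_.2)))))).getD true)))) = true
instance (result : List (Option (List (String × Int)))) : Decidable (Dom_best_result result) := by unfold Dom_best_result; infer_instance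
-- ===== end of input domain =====

-- B replaces A's sequential per-material rescans (with early return) by ONE pass over `result`
-- maintaining the best dict and top count for each of the four materials, followed by a
-- priority pass over the materials (objective: alternative decomposition, same O(n) cost).

-- ===== PORT A =====
-- the keys of the module-level `material` dict, in insertion order
def pvMaterials : List String := ["geode", "obsidian", "clay", "ore"]

-- Python truthiness of `best` (None or a dict): truthy iff a non-empty dict
def pvTruthy (best : Option (List (String × Int))) : Bool :=
  match best with
  | some d => !d.isEmpty
  | none => false

-- body of A's inner `for i, r in enumerate(result)` loop (the index i is unused).
-- Python sets `highest = r[m]`; at that point `r.get(m, 0) > highest` has just held with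
-- highest ≥ 0, so the key is present and r[m] = r.get(m, 0): porting it as getD is exact.
def pvStepA (m : String) (st : Option (List (String × Int)) × Int)
    (r : Option (List (String × Int))) : Option (List (String × Int)) × Int :=
  match r with
  | none => st
  | some d => if PySem.Dict.getD ⟨d⟩ m 0 > st.2 then (some d, PySem.Dict.getD ⟨d⟩ m 0) else st

-- A's outer `for m in material` loop with its early `return best`
def pvOuterA (result : List (Option (List (String × Int)))) :
    List String → Option (List (String × Int)) × Int → Option (List (String × Int))
  | [], st => st.1
  | m :: ms, st =>
    if pvTruthy st.1 then st.1
    else pvOuterA result ms (List.foldl (pvStepA m) st result)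

def best_result (result : List (Option (List (String × Int)))) : Option (List (String × Int)) :=
  pvOuterA result pvMaterials (none, 0)

-- ===== PORT B =====
-- per-material update: `v = r.get(m, 0); if v > top[m]: top[m] = v; best[m] = r`
def pvStepB (m : String) (d : List (String × Int))
    (st : Option (List (String × Int)) × Int) : Option (List (String × Int)) × Int :=
  let v := PySem.Dict.getD ⟨d⟩ m 0
  if v > st.2 then (some d, v) else st

-- body of B's single `for r in result` loop: update all four (best, top) slots
def pvUpd (s : (Option (List (String × Int)) × Int) × (Option (List (String × Int)) × Int) ×
    (Option (List (String × Int)) × Int) × (Option (List (String × Int)) × Int))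
    (r : Option (List (String × Int))) :
    (Option (List (String × Int)) × Int) × (Option (List (String × Int)) × Int) ×
    (Option (List (String × Int)) × Int) × (Option (List (String × Int)) × Int) :=
  match r with
  | none => s
  | some d => (pvStepB "geode" d s.1, pvStepB "obsidian" d s.2.1,
               pvStepB "clay" d s.2.2.1, pvStepB "ore" d s.2.2.2)

def best_result_alt (result : List (Option (List (String × Int)))) : Option (List (String × Int)) :=
  let s := List.foldl pvUpd (((none, 0), (none, 0), (none, 0), (none, 0))) result
  -- `for m in MATERIALS: if best[m] is not None: return best[m]` then `return None`
  match s.1.1 with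
  | some d => some d
  | none =>
    match s.2.1.1 with
    | some d => some d
    | none =>
      match s.2.2.1.1 with
      | some d => some d
      | none =>
        match s.2.2.2.1 with
        | some d => some d
        | none => none

-- ===== PRECONDITION & SPEC =====
def Spec_best_result (result : List (Option (List (String × Int)))) (out : Option (List (String × Int))) : Prop := out = best_result_alt result
instance (result : List (Option (List (String × Int)))) (out : Option (List (String × Int))) : Decidable (Spec_best_result result out) := by unfold Spec_best_result; infer_instance

-- ===== CLAIM (what is proved, stated in full; the proofs are below) =====
def Claim_equal_best_result : Prop := ∀ (result : List (Option (List (String × Int)))), Dom_best_result result → Spec_best_result result (best_result result)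

-- ===== LEMMAS AND PROOFS =====

-- invariant of A's (best, highest) state: best = None goes with highest = 0, and a chosen
-- best is a non-empty dict with highest > 0
def pvInv (st : Option (List (String × Int)) × Int) : Prop :=
  (st.1 = none → st.2 = 0) ∧ (∀ d, st.1 = some d → d ≠ [] ∧ 0 < st.2)

theorem pvInv_init : pvInv (none, 0) := by
  constructor
  · intro _; rfl
  · intro d h; simp at h

theorem pvInv_step (m : String) (st : Option (List (String × Int)) × Int)
    (r : Option (List (String × Int))) (h : pvInv st) : pvInv (pvStepA m st r) := by
  cases r with
  | none => exact h
  | some d =>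
    have h2 : (0:Int) ≤ st.2 := by
      cases hb : st.1 with
      | none => exact le_of_eq (h.1 hb).symm
      | some d' => exact le_of_lt (h.2 d' hb).2
    simp only [pvStepA]
    split_ifs with hv
    · constructor
      · intro hc; simp at hc
      · intro d' hd'
        obtain rfl : d = d' := by cases hd'; rfl
        refine ⟨fun hnil => ?_, lt_of_le_of_lt h2 hv⟩
        subst hnil
        simp [PySem.Dict.getD, PySem.Dict.get?] at hv
        omega
    · exact h

theorem pvInv_fold (m : String) (result : List (Option (List (String × Int))))
    (st : Option (List (String × Int)) × Int) (h : pvInv st) :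
    pvInv (List.foldl (pvStepA m) st result) := by
  induction result generalizing st with
  | nil => exact h
  | cons r rs ih => exact ih _ (pvInv_step m st r h)

-- B's 4-slot fold computes the four independent A-folds
theorem pvFold4 (result : List (Option (List (String × Int))))
    (s : (Option (List (String × Int)) × Int) × (Option (List (String × Int)) × Int) ×
      (Option (List (String × Int)) × Int) × (Option (List (String × Int)) × Int)) :
    List.foldl pvUpd s result =
      (List.foldl (pvStepA "geode") s.1 result,
       List.foldl (pvStepA "obsidian") s.2.1 result,
       List.foldl (pvStepA "clay") s.2.2.1 result,
       List.foldl (pvStepA "ore") s.2.2.2 result) := by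
  induction result generalizing s with
  | nil => rfl
  | cons r rs ih =>
    cases r with
    | none => simpa [List.foldl, pvUpd, pvStepA] using ih s
    | some d => simpa [List.foldl, pvUpd, pvStepB, pvStepA] using ih _

-- A's outer loop ignores a (None, _) state's guard and folds the next material
theorem pvOuter_cons_none (result : List (Option (List (String × Int)))) (m : String)
    (ms : List String) :
    pvOuterA result (m :: ms) (none, 0) =
      pvOuterA result ms (List.foldl (pvStepA m) (none, 0) result) := by
  simp [pvOuterA, pvTruthy]

-- once best is a non-empty dict, A's next guard returns it
theorem pvOuter_cons_some (result : List (Option (List (String × Int)))) (m : String)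
    (ms : List String) (s : Option (List (String × Int)) × Int) (d : List (String × Int))
    (h : s.1 = some d) (hd : d ≠ []) : pvOuterA result (m :: ms) s = some d := by
  simp [pvOuterA, pvTruthy, h, hd]

theorem pvMain (result : List (Option (List (String × Int)))) :
    best_result result = best_result_alt result := by
  unfold best_result best_result_alt pvMaterials
  rw [pvFold4]
  rw [pvOuter_cons_none]
  have i1 := pvInv_fold "geode" result _ pvInv_init
  cases h1 : (List.foldl (pvStepA "geode") ((none : Option (List (String × Int))), (0:Int)) result).1 with
  | some d =>
    rw [pvOuter_cons_some result _ _ _ d h1 (i1.2 d h1).1]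
    simp [h1]
  | none =>
    have e1 : List.foldl (pvStepA "geode") ((none : Option (List (String × Int))), (0:Int)) result = (none, 0) := Prod.ext h1 (i1.1 h1)
    rw [e1, pvOuter_cons_none]
    have i2 := pvInv_fold "obsidian" result _ pvInv_init
    cases h2 : (List.foldl (pvStepA "obsidian") ((none : Option (List (String × Int))), (0:Int)) result).1 with
    | some d =>
      rw [pvOuter_cons_some result _ _ _ d h2 (i2.2 d h2).1]
      simp [h2]
    | none =>
      have e2 : List.foldl (pvStepA "obsidian") ((none : Option (List (String × Int))), (0:Int)) result = (none, 0) := Prod.ext h2 (i2.1 h2)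
      rw [e2, pvOuter_cons_none]
      have i3 := pvInv_fold "clay" result _ pvInv_init
      cases h3 : (List.foldl (pvStepA "clay") ((none : Option (List (String × Int))), (0:Int)) result).1 with
      | some d =>
        rw [pvOuter_cons_some result _ _ _ d h3 (i3.2 d h3).1]
        simp [h3]
      | none =>
        have e3 : List.foldl (pvStepA "clay") ((none : Option (List (String × Int))), (0:Int)) result = (none, 0) := Prod.ext h3 (i3.1 h3)
        rw [e3, pvOuter_cons_none]
        cases h4 : (List.foldl (pvStepA "ore") ((none : Option (List (String × Int))), (0:Int)) result).1 with
        | some d => simp [pvOuterA, h4]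
        | none => simp [pvOuterA, h4]

-- ===== VERDICT (by name: the statement is the Claim_ definition above) =====
theorem best_result_spec : Claim_equal_best_result := by
  intro result _
  unfold Spec_best_result
  exact pvMain result
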